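-- pv_equiv track=rewrite | github.com/TeerapatChan/CU-algorithm | a60_q1_matmod-223834.py | solve
-- ===== SOURCE A (Python) =====
-- def mul(x,l,k):
--     return [(x[0]*l[0]+x[1]*l[2])%k,
--     (x[0]*l[1]+x[1]*l[3])%k,
--     (x[2]*l[0]+x[3]*l[2])%k,
--     (x[2]*l[1]+x[3]*l[3])%k]
--
-- def solve(l,n,k):
--     if n == 1: return mul(l,[1,0,0,1],k)
--     if n % 2 == 0:
--         m = solve(l,n//2,k)
--         return mul(m,m,k)
--     else:
--         m = solve(l,n//2,k)
--         x = mul(m,m,k)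
--         return mul(x,l,k)
-- ===== SOURCE B (Python) =====
-- def mul(x,l,k):
--     return [(x[0]*l[0]+x[1]*l[2])%k,
--     (x[0]*l[1]+x[1]*l[3])%k,
--     (x[2]*l[0]+x[3]*l[2])%k,
--     (x[2]*l[1]+x[3]*l[3])%k]
--
-- def solve(l,n,k):
--     result = [1, 0, 0, 1]
--     base = l
--     while n > 0:
--         if n % 2 == 1:
--             result = mul(result, base, k)
--         base = mul(base, base, k)
--         n //= 2
--     return result
-- ===== Notes on version B (the rewrite author's own statement) =====
-- stated objective: idiomatic
-- what changed: Replaced the recursive top-down halving with the standard iterative binary-exponentiation loop that maintains a running product and a repeatedly squared base, processing the exponent's bits from low to high.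
import Mathlib
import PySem

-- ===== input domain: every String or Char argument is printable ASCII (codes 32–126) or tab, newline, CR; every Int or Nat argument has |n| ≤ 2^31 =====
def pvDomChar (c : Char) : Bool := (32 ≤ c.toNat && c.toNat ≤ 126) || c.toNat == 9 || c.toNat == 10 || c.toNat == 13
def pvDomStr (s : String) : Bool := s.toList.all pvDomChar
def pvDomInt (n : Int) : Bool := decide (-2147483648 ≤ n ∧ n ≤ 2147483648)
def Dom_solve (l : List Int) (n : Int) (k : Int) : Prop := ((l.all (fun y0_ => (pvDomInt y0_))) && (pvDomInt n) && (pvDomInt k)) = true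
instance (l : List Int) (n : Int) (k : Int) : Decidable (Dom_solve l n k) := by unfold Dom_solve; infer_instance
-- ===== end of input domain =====

-- B replaces A's recursive halving by the iterative binary-exponentiation loop (same mul helper); same values for all n >= 1.


-- ===== PORT A =====
-- x[i] for i = 0..3; Python raises IndexError when the list is shorter — those inputs are
-- excluded by Pre_solve (pyGet? is none there; the .getD 0 default is never reached inside Pre_).
def pvGet (x : List Int) (i : Int) : Int := (PySem.List.pyGet? x i).getD 0

-- the helper `mul` (textually identical in Source A and Source B; shared by both ports)
def pvMul (x l : List Int) (k : Int) : List Int :=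
  [ PySem.Int.mod (pvGet x 0 * pvGet l 0 + pvGet x 1 * pvGet l 2) k,
    PySem.Int.mod (pvGet x 0 * pvGet l 1 + pvGet x 1 * pvGet l 3) k,
    PySem.Int.mod (pvGet x 2 * pvGet l 0 + pvGet x 3 * pvGet l 2) k,
    PySem.Int.mod (pvGet x 2 * pvGet l 1 + pvGet x 3 * pvGet l 3) k ]

-- the recursion of Source A on n, made total with a Nat fuel (n.toNat suffices: n is at least
-- halved each call); Python recurses forever for n ≤ 1 reached below the top `n == 1` test
-- (RecursionError) — there the guard returns [] and Pre_solve excludes the input.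
def solveGo (fuel : Nat) (l : List Int) (n : Int) (k : Int) : List Int :=
  match fuel with
  | 0 => []
  | fuel + 1 =>
    if n = 1 then pvMul l [1, 0, 0, 1] k
    else if n ≤ 1 then []
    else if PySem.Int.mod n 2 = 0 then
      let m := solveGo fuel l (PySem.Int.floordiv n 2) k
      pvMul m m k
    else
      let m := solveGo fuel l (PySem.Int.floordiv n 2) k
      pvMul (pvMul m m k) l k

def solve (l : List Int) (n : Int) (k : Int) : List Int := solveGo n.toNat l n k

-- ===== PORT B =====
-- the while-loop of Source B, state (result, base, n); fuel n.toNat + 1 suffices (n at least halves)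
def powLoopGo (fuel : Nat) (result base : List Int) (n : Int) (k : Int) : List Int :=
  match fuel with
  | 0 => result
  | fuel + 1 =>
    if n ≤ 0 then result
    else
      let result' := if PySem.Int.mod n 2 = 1 then pvMul result base k else result
      powLoopGo fuel result' (pvMul base base k) (PySem.Int.floordiv n 2) k

def powLoop (result base : List Int) (n : Int) (k : Int) : List Int :=
  powLoopGo (n.toNat + 1) result base n k

def solve_alt (l : List Int) (n : Int) (k : Int) : List Int :=
  powLoop [1, 0, 0, 1] l n k

-- ===== PRECONDITION & SPEC =====
-- exactly where Python's A returns: the matrix needs 4 entries (IndexError), n ≥ 1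
-- (RecursionError otherwise), k ≠ 0 (ZeroDivisionError).
def Pre_solve (l : List Int) (n : Int) (k : Int) : Prop := 4 ≤ l.length ∧ 1 ≤ n ∧ k ≠ 0
instance (l : List Int) (n : Int) (k : Int) : Decidable (Pre_solve l n k) := by unfold Pre_solve; infer_instance
def pvWitness_solve : List Int × Int × Int := ([1, 2, 3, 4], 5, 7)

def Spec_solve (l : List Int) (n : Int) (k : Int) (out : List Int) : Prop := out = solve_alt l n k
instance (l : List Int) (n : Int) (k : Int) (out : List Int) : Decidable (Spec_solve l n k out) := by unfold Spec_solve; infer_instance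

-- ===== CLAIM (what is proved, stated in full; the proofs are below) =====
def Claim_equal_solve : Prop := ∀ (l : List Int) (n : Int) (k : Int), Dom_solve l n k → Pre_solve l n k → Spec_solve l n k (solve l n k)

-- ===== LEMMAS AND PROOFS =====

-- integer 2x2 matrices as quadruples (row-major), exact arithmetic (no mod)
def imul (a b : Int × Int × Int × Int) : Int × Int × Int × Int :=
  (a.1 * b.1 + a.2.1 * b.2.2.1,
   a.1 * b.2.1 + a.2.1 * b.2.2.2,
   a.2.2.1 * b.1 + a.2.2.2 * b.2.2.1,
   a.2.2.1 * b.2.1 + a.2.2.2 * b.2.2.2)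

def ipow (a : Int × Int × Int × Int) : Nat → Int × Int × Int × Int
  | 0 => (1, 0, 0, 1)
  | m + 1 => imul (ipow a m) a

def qOf (x : List Int) : Int × Int × Int × Int := (pvGet x 0, pvGet x 1, pvGet x 2, pvGet x 3)

def qmod (k : Int) (a : Int × Int × Int × Int) : Int × Int × Int × Int :=
  (PySem.Int.mod a.1 k, PySem.Int.mod a.2.1 k, PySem.Int.mod a.2.2.1 k, PySem.Int.mod a.2.2.2 k)

def toL (a : Int × Int × Int × Int) : List Int := [a.1, a.2.1, a.2.2.1, a.2.2.2]

def QEq (k : Int) (a b : Int × Int × Int × Int) : Prop :=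
  a.1 ≡ b.1 [ZMOD k] ∧ a.2.1 ≡ b.2.1 [ZMOD k] ∧ a.2.2.1 ≡ b.2.2.1 [ZMOD k] ∧ a.2.2.2 ≡ b.2.2.2 [ZMOD k]

theorem fm_modEq (a k : Int) : PySem.Int.mod a k ≡ a [ZMOD k] := by
  have h := PySem.Int.floordiv_mul_add_mod a k
  have : k ∣ a - PySem.Int.mod a k := ⟨PySem.Int.floordiv a k, by linarith⟩
  exact (Int.modEq_iff_dvd.mpr this)

theorem fm_congr {a b k : Int} (hk : k ≠ 0) (h : a ≡ b [ZMOD k]) :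
    PySem.Int.mod a k = PySem.Int.mod b k := by
  have hd : k ∣ PySem.Int.mod b k - PySem.Int.mod a k :=
    Int.modEq_iff_dvd.mp (((fm_modEq a k).trans h).trans (fm_modEq b k).symm)
  rcases lt_or_gt_of_ne hk with hneg | hpos
  · have h1 := PySem.Int.mod_neg_bounds (a := a) hneg
    have h2 := PySem.Int.mod_neg_bounds (a := b) hneg
    obtain ⟨t, ht⟩ := hd
    have ht0 : t = 0 := by nlinarith [h1.1, h1.2, h2.1, h2.2]
    rw [ht0, mul_zero] at ht
    omega
  · have h1a := PySem.Int.mod_nonneg (a := a) hpos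
    have h1b := PySem.Int.mod_lt (a := a) hpos
    have h2a := PySem.Int.mod_nonneg (a := b) hpos
    have h2b := PySem.Int.mod_lt (a := b) hpos
    obtain ⟨t, ht⟩ := hd
    have ht0 : t = 0 := by nlinarith
    rw [ht0, mul_zero] at ht
    omega

theorem qmod_QEq (k : Int) (a : Int × Int × Int × Int) : QEq k (qmod k a) a :=
  ⟨fm_modEq _ _, fm_modEq _ _, fm_modEq _ _, fm_modEq _ _⟩

theorem qOf_toL (a : Int × Int × Int × Int) : qOf (toL a) = a := by
  simp [qOf, toL, pvGet, PySem.List.pyGet?, PySem.List.pyIdx?]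

theorem pvMul_toL (x y : List Int) (k : Int) :
    pvMul x y k = toL (qmod k (imul (qOf x) (qOf y))) := rfl

theorem pvMul_congr {x y : List Int} {a b : Int × Int × Int × Int} {k : Int} (hk : k ≠ 0)
    (hx : QEq k (qOf x) a) (hy : QEq k (qOf y) b) :
    pvMul x y k = toL (qmod k (imul a b)) := by
  obtain ⟨hx1, hx2, hx3, hx4⟩ := hx
  obtain ⟨hy1, hy2, hy3, hy4⟩ := hy
  rw [pvMul_toL]
  simp only [toL, qmod, imul]
  refine congrArg₂ _ (fm_congr hk (Int.ModEq.add (hx1.mul hy1) (hx2.mul hy3))) ?_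
  refine congrArg₂ _ (fm_congr hk (Int.ModEq.add (hx1.mul hy2) (hx2.mul hy4))) ?_
  refine congrArg₂ _ (fm_congr hk (Int.ModEq.add (hx3.mul hy1) (hx4.mul hy3))) ?_
  exact congrArg₂ _ (fm_congr hk (Int.ModEq.add (hx3.mul hy2) (hx4.mul hy4))) rfl

theorem imul_assoc (a b c : Int × Int × Int × Int) : imul (imul a b) c = imul a (imul b c) := by
  obtain ⟨a1, a2, a3, a4⟩ := a; obtain ⟨b1, b2, b3, b4⟩ := b; obtain ⟨c1, c2, c3, c4⟩ := c
  simp only [imul, Prod.mk.injEq]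
  refine ⟨by ring, by ring, by ring, by ring⟩

theorem one_imul (a : Int × Int × Int × Int) : imul (1, 0, 0, 1) a = a := by
  obtain ⟨a1, a2, a3, a4⟩ := a
  simp only [imul, Prod.mk.injEq]
  refine ⟨by ring, by ring, by ring, by ring⟩

theorem imul_one (a : Int × Int × Int × Int) : imul a (1, 0, 0, 1) = a := by
  obtain ⟨a1, a2, a3, a4⟩ := a
  simp only [imul, Prod.mk.injEq]
  refine ⟨by ring, by ring, by ring, by ring⟩

theorem ipow_add (a : Int × Int × Int × Int) (i j : Nat) :
    imul (ipow a i) (ipow a j) = ipow a (i + j) := by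
  induction j with
  | zero => simp [ipow, imul_one]
  | succ m ih => rw [ipow, ← imul_assoc, ih]; rfl

theorem ipow_one (a : Int × Int × Int × Int) : ipow a 1 = a := by
  rw [ipow, ipow, one_imul]

theorem ipow_sq (a : Int × Int × Int × Int) (m : Nat) :
    ipow (imul a a) m = ipow a (2 * m) := by
  induction m with
  | zero => rfl
  | succ i ih =>
      rw [ipow, ih]
      have h2 : imul a a = ipow a 2 := by
        rw [show (2 : Nat) = 1 + 1 from rfl, ← ipow_add, ipow_one]
      rw [h2, ipow_add, Nat.mul_succ]

theorem qOf_id : qOf [1, 0, 0, 1] = (1, 0, 0, 1) := by decide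

theorem QEq_refl (k : Int) (a : Int × Int × Int × Int) : QEq k a a :=
  ⟨Int.ModEq.refl _, Int.ModEq.refl _, Int.ModEq.refl _, Int.ModEq.refl _⟩

theorem QEq_toL_qmod (k : Int) (a : Int × Int × Int × Int) : QEq k (qOf (toL (qmod k a))) a := by
  rw [qOf_toL]; exact qmod_QEq k a

-- characterisation of A: solve l n k is the entrywise Python-mod reduction of (qOf l)^n
theorem solveGo_char (l : List Int) (k : Int) (hk : k ≠ 0) :
    ∀ (m : Nat) (n : Int), n.toNat ≤ m → 1 ≤ n →
      solveGo m l n k = toL (qmod k (ipow (qOf l) n.toNat)) := by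
  intro m
  induction m with
  | zero => intro n hle h1; omega
  | succ M ih =>
      intro n hle h1
      rw [solveGo]
      by_cases h1' : n = 1
      · subst h1'
        rw [if_pos rfl, pvMul_congr hk (QEq_refl k (qOf l))
            (show QEq k (qOf [1, 0, 0, 1]) (1, 0, 0, 1) from by
              rw [qOf_id]; exact QEq_refl k _),
          imul_one, show Int.toNat 1 = 1 from rfl, ipow_one]
      · rw [if_neg h1', if_neg (by omega)]
        have hfd : PySem.Int.floordiv n 2 = n / 2 :=
          PySem.Int.floordiv_eq_ediv_of_pos (by norm_num)
        have hm2 : PySem.Int.mod n 2 = n % 2 :=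
          PySem.Int.mod_eq_emod_of_pos (by norm_num)
        have hrec : solveGo M l (PySem.Int.floordiv n 2) k
            = toL (qmod k (ipow (qOf l) (PySem.Int.floordiv n 2).toNat)) := by
          apply ih <;> omega
        by_cases hpar : PySem.Int.mod n 2 = 0
        · rw [if_pos hpar]
          show pvMul (solveGo M l (PySem.Int.floordiv n 2) k) (solveGo M l (PySem.Int.floordiv n 2) k) k = _
          rw [hrec, pvMul_congr hk (QEq_toL_qmod k _) (QEq_toL_qmod k _), ipow_add]
          have : (PySem.Int.floordiv n 2).toNat + (PySem.Int.floordiv n 2).toNat = n.toNat := by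
            omega
          rw [this]
        · rw [if_neg hpar]
          show pvMul (pvMul (solveGo M l (PySem.Int.floordiv n 2) k)
              (solveGo M l (PySem.Int.floordiv n 2) k) k) l k = _
          rw [hrec, pvMul_congr hk (QEq_toL_qmod k _) (QEq_toL_qmod k _),
            pvMul_congr hk (QEq_toL_qmod k _) (QEq_refl k (qOf l)), ipow_add]
          rw [show imul (ipow (qOf l) ((PySem.Int.floordiv n 2).toNat + (PySem.Int.floordiv n 2).toNat)) (qOf l)
              = ipow (qOf l) ((PySem.Int.floordiv n 2).toNat + (PySem.Int.floordiv n 2).toNat + 1) from rfl]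
          rw [show (PySem.Int.floordiv n 2).toNat + (PySem.Int.floordiv n 2).toNat + 1 = n.toNat by omega]

-- loop invariant of B
theorem powLoopGo_char (k : Int) (hk : k ≠ 0) :
    ∀ (m : Nat) (n : Int), n.toNat ≤ m → 1 ≤ n →
      ∀ (r b : List Int) (R B : Int × Int × Int × Int),
        QEq k (qOf r) R → QEq k (qOf b) B →
        powLoopGo (m + 1) r b n k = toL (qmod k (imul R (ipow B n.toNat))) := by
  intro m
  induction m with
  | zero => intro n hle h1; omega
  | succ M ih =>
      intro n hle h1 r b R B hr hb
      rw [powLoopGo, if_neg (by omega)]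
      have hfd : PySem.Int.floordiv n 2 = n / 2 :=
        PySem.Int.floordiv_eq_ediv_of_pos (by norm_num)
      have hm2 : PySem.Int.mod n 2 = n % 2 :=
        PySem.Int.mod_eq_emod_of_pos (by norm_num)
      by_cases hn1 : n = 1
      · subst hn1
        rw [if_pos (by rw [hm2]; decide), powLoopGo, if_pos (by rw [hfd]; decide)]
        rw [pvMul_congr hk hr hb, show Int.toNat 1 = 1 from rfl, ipow_one]
      · have hrec1 : 1 ≤ PySem.Int.floordiv n 2 := by omega
        have hrecm : (PySem.Int.floordiv n 2).toNat ≤ M := by omega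
        by_cases hpar : PySem.Int.mod n 2 = 1
        · rw [if_pos hpar]
          rw [ih _ hrecm hrec1 _ _ (imul R B) (imul B B)
            (by rw [pvMul_congr hk hr hb]; exact QEq_toL_qmod k _)
            (by rw [pvMul_congr hk hb hb]; exact QEq_toL_qmod k _)]
          rw [ipow_sq, imul_assoc R B (ipow B (2 * (PySem.Int.floordiv n 2).toNat))]
          have hB : imul B (ipow B (2 * (PySem.Int.floordiv n 2).toNat))
              = ipow B (1 + 2 * (PySem.Int.floordiv n 2).toNat) := by
            rw [← ipow_add, ipow_one]
          rw [hB, show 1 + 2 * (PySem.Int.floordiv n 2).toNat = n.toNat by omega]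
        · rw [if_neg hpar]
          rw [ih _ hrecm hrec1 _ _ R (imul B B) hr
            (by rw [pvMul_congr hk hb hb]; exact QEq_toL_qmod k _)]
          rw [ipow_sq]
          have : 2 * (PySem.Int.floordiv n 2).toNat = n.toNat := by omega
          rw [this]

-- ===== VERDICT (by name: the statement is the Claim_ definition above) =====
theorem solve_spec : Claim_equal_solve := by
  intro l n k _hdom ⟨hlen, h1, hk⟩
  unfold Spec_solve solve_alt solve powLoop
  rw [solveGo_char l k hk n.toNat n le_rfl h1,
    powLoopGo_char k hk n.toNat n le_rfl h1 [1, 0, 0, 1] l (1, 0, 0, 1) (qOf l)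
      (by rw [qOf_id]; exact QEq_refl k _) (QEq_refl k (qOf l)),
    one_imul]
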